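-- pv_equiv track=rewrite | github.com/gmy2013/icse26_failure_refinement | mushroom_toxicity_subsegments/mushroom_toxicity_subsegments/main.py | _count_valid_subsegments
-- ===== SOURCE A (Python) =====
-- from collections import Counter
-- from typing import List, Tuple
--
-- def _count_valid_subsegments(n: int, x: int, a: List[int]) -> int:
--     """Count the number of subsegments with nonzero final toxicity.
--
--     Args:
--         n: Number of mushrooms.
--         x: Toxicity threshold.
--         a: List of toxicity values.
--
--     Returns:
--         The number of valid subsegments.
--     """
--     mod = x + 1
--     prefix_sum = 0
--     prefix_count = Counter()
--     prefix_count[0] = 1  # Empty prefix sum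
--     total_subsegments = 0
--
--     for value in a:
--         prefix_sum = (prefix_sum + value) % mod
--         # For each position, the number of subsegments ending here
--         # whose sum modulo mod is zero is prefix_count[prefix_sum]
--         # So, total subsegments so far = number of prefixes so far
--         # The number of subsegments ending here is i+1 (since 0-based)
--         # But we want subsegments whose sum modulo mod != 0
--         # So, total subsegments ending here = i+1
--         # Number of subsegments with sum modulo mod == 0 = prefix_count[prefix_sum]
--         # So, number of subsegments with sum modulo mod != 0 = (i+1) - prefix_count[prefix_sum]
--         # But we need to count all subsegments, so we count for all prefixes
--         # Instead, we can count total number of subsegments, and subtract those with sum modulo mod == 0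
--
--         prefix_count[prefix_sum] += 1
--
--     # Total number of subsegments = n * (n+1) // 2
--     total_subsegments = n * (n + 1) // 2
--
--     # Number of subsegments with sum modulo mod == 0
--     zero_mod_subsegments = 0
--     for count in prefix_count.values():
--         # For each prefix sum value, the number of ways to choose two positions with the same prefix sum
--         # (i.e., subsegment sum modulo mod == 0) is C(count, 2)
--         zero_mod_subsegments += count * (count - 1) // 2
--
--     valid_subsegments = total_subsegments - zero_mod_subsegments
--     return valid_subsegments
-- ===== SOURCE B (Python) =====
-- from typing import List
--
--
-- def _count_valid_subsegments(n: int, x: int, a: List[int]) -> int: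
--     """Count subsegments whose sum modulo (x+1) is nonzero.
--
--     Sort-then-scan: build the list of modular prefix sums (including the
--     empty prefix), sort it, and count pairs of equal prefix sums by
--     scanning maximal runs of equal values -- no Counter / hash map at all.
--     """
--     mod = x + 1
--     prefix_sums = [0]
--     s = 0
--     for value in a:
--         s = (s + value) % mod
--         prefix_sums.append(s)
--     prefix_sums.sort()
--     zero_mod = 0
--     run = 1
--     for i in range(1, len(prefix_sums)):
--         if prefix_sums[i] == prefix_sums[i - 1]:
--             run += 1
--         else:
--             zero_mod += run * (run - 1) // 2
--             run = 1
--     zero_mod += run * (run - 1) // 2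
--     return n * (n + 1) // 2 - zero_mod
-- ===== Notes on version B (the rewrite author's own statement) =====
-- stated objective: alternative
-- what changed: The Counter hash map is gone: B collects all modular prefix sums into a list, sorts it, and counts equal pairs by scanning maximal runs of equal adjacent values, trading O(n) hashing for O(n log n) sorting.
import Mathlib
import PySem

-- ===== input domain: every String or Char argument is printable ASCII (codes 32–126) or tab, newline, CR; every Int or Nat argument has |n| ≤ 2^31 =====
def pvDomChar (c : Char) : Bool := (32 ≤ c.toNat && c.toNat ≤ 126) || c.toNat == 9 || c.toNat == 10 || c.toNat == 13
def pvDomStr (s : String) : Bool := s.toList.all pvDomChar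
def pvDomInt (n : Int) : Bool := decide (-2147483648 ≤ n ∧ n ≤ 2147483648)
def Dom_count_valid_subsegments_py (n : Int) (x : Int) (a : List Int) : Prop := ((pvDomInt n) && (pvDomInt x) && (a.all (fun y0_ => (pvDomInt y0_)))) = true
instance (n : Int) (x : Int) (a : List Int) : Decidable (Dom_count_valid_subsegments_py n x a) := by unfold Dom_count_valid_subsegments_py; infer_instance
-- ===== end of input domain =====

-- B replaces A's Counter hash map by sort-then-scan over the modular prefix sums (objective: alternative; not faster).


-- ===== PORT A =====
-- one loop iteration of A: prefix_sum = (prefix_sum + value) % mod; prefix_count[prefix_sum] += 1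
def cvsStepA (m : Int) (st : Int × PySem.Dict Int Int) (value : Int) : Int × PySem.Dict Int Int :=
  let ps := PySem.Int.mod (st.1 + value) m
  (ps, st.2.modify ps 0 (· + 1))

def count_valid_subsegments_py (n : Int) (x : Int) (a : List Int) : Int :=
  let m := x + 1
  let st := a.foldl (cvsStepA m) (0, (PySem.Dict.empty).insert 0 1)
  let total := PySem.Int.floordiv (n * (n + 1)) 2
  let zero := st.2.values.foldl (fun acc c => acc + PySem.Int.floordiv (c * (c - 1)) 2) 0
  total - zero

-- ===== PORT B =====
-- B's first loop: s = (s + value) % mod; prefix_sums.append(s)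
def cvsBuild (m : Int) (st : Int × List Int) (value : Int) : Int × List Int :=
  let p := PySem.Int.mod (st.1 + value) m
  (p, st.2 ++ [p])

-- B's scan loop over the sorted list, carrying (previous value, current run length, zero_mod),
-- with the final 'zero_mod += run * (run - 1) // 2' flush at the end
def cvsScan (prev run zero : Int) : List Int → Int
  | [] => zero + PySem.Int.floordiv (run * (run - 1)) 2
  | p :: t =>
    if p = prev then cvsScan p (run + 1) zero t
    else cvsScan p 1 (zero + PySem.Int.floordiv (run * (run - 1)) 2) t

def count_valid_subsegments_py_alt (n : Int) (x : Int) (a : List Int) : Int :=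
  let m := x + 1
  let prefixSums := (a.foldl (cvsBuild m) (0, [0])).2
  let s := PySem.List.sorted prefixSums (fun p => p) false
  let zero : Int := match s with
    | [] => 0
    | h :: t => cvsScan h 1 0 t
  PySem.Int.floordiv (n * (n + 1)) 2 - zero

-- ===== PRECONDITION & SPEC =====
-- Pre_ excludes only x = -1 with a nonempty list, where Python A (and B) raise ZeroDivisionError on '% (x+1)'.
def Pre_count_valid_subsegments_py (n : Int) (x : Int) (a : List Int) : Prop := x = -1 → a = []
instance (n : Int) (x : Int) (a : List Int) : Decidable (Pre_count_valid_subsegments_py n x a) := by unfold Pre_count_valid_subsegments_py; infer_instance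
def pvWitness_count_valid_subsegments_py : Int × Int × List Int := (4, 2, [1, 3, 2, 5])

def Spec_count_valid_subsegments_py (n : Int) (x : Int) (a : List Int) (out : Int) : Prop := out = count_valid_subsegments_py_alt n x a
instance (n : Int) (x : Int) (a : List Int) (out : Int) : Decidable (Spec_count_valid_subsegments_py n x a out) := by unfold Spec_count_valid_subsegments_py; infer_instance

-- ===== CLAIM (what is proved, stated in full; the proofs are below) =====
def Claim_equal_count_valid_subsegments_py : Prop := ∀ (n : Int) (x : Int) (a : List Int), Dom_count_valid_subsegments_py n x a → Pre_count_valid_subsegments_py n x a → Spec_count_valid_subsegments_py n x a (count_valid_subsegments_py n x a)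

-- ===== LEMMAS AND PROOFS =====

-- f c = c * (c - 1) // 2, the pairs count of a run of c equal values
def cvsF (c : Int) : Int := PySem.Int.floordiv (c * (c - 1)) 2

-- the tail of the modular prefix-sum sequence starting from running sum s
def cvsPrefs (m s : Int) : List Int → List Int
  | [] => []
  | v :: t => PySem.Int.mod (s + v) m :: cvsPrefs m (PySem.Int.mod (s + v) m) t

-- zero-pairs count, by recursion on the value support
def cvsN : List Int → Int
  | [] => 0
  | v :: t => cvsF (1 + (t.count v : Int)) + cvsN (t.filter (· ≠ v))
termination_by l => l.length
decreasing_by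
  rw [List.length_unattach]
  exact Nat.lt_succ_of_le (le_trans (List.length_filter_le _ _) (le_of_eq List.length_attach))

theorem cvsN_nil : cvsN [] = 0 := by rw [cvsN.eq_def]

theorem cvsN_cons (v : Int) (t : List Int) :
    cvsN (v :: t) = cvsF (1 + (t.count v : Int)) + cvsN (t.filter (· ≠ v)) := by
  rw [cvsN.eq_def]

theorem cvs_loopA (m : Int) (a : List Int) (s : Int) (d : PySem.Dict Int Int) :
    (a.foldl (cvsStepA m) (s, d)).2 =
      (cvsPrefs m s a).foldl (fun d p => d.modify p 0 (· + 1)) d := by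
  induction a generalizing s d with
  | nil => rfl
  | cons v t ih =>
    simp only [List.foldl_cons, cvsStepA, cvsPrefs]
    exact ih _ _

theorem cvs_loopB (m : Int) (a : List Int) (s : Int) (l : List Int) :
    (a.foldl (cvsBuild m) (s, l)).2 = l ++ cvsPrefs m s a := by
  induction a generalizing s l with
  | nil => simp [cvsPrefs]
  | cons v t ih =>
    simp only [List.foldl_cons, cvsBuild, cvsPrefs]
    rw [ih]
    simp

theorem cvs_sum_eq_of_nodup_mem (l₁ l₂ : List Int) (g : Int → Int)
    (h₁ : l₁.Nodup) (h₂ : l₂.Nodup) (h : ∀ y, y ∈ l₁ ↔ y ∈ l₂) :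
    (l₁.map g).sum = (l₂.map g).sum :=
  ((List.perm_ext_iff_of_nodup h₁ h₂).mpr h).map g |>.sum_eq

-- support characterisation of cvsN
theorem cvsN_char (l : List Int) :
    cvsN l = ((PySem.Set.ofList l).map (fun k => cvsF (l.count k : Int))).sum := by
  induction hl : l.length using Nat.strong_induction_on generalizing l with
  | _ n ih =>
    cases l with
    | nil => simp [cvsN_nil]
    | cons v t =>
      have hlen : (t.filter (· ≠ v)).length < n := by
        simpa [← hl] using Nat.lt_succ_of_le (List.length_filter_le _ t)
      rw [cvsN_cons, ih _ hlen _ rfl]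
      have hperm : (PySem.Set.ofList (v :: t)).Perm
          (v :: PySem.Set.ofList (t.filter (· ≠ v))) := by
        refine (List.perm_ext_iff_of_nodup (PySem.Set.nodup_ofList _) ?_).mpr ?_
        · refine List.nodup_cons.mpr ⟨?_, PySem.Set.nodup_ofList _⟩
          simp [PySem.Set.mem_ofList, List.mem_filter]
        · intro y
          simp only [PySem.Set.mem_ofList, List.mem_cons, List.mem_filter]
          constructor
          · rintro (rfl | hy)
            · exact Or.inl rfl
            · by_cases hyv : y = v
              · exact Or.inl hyv
              · exact Or.inr ⟨hy, by simpa using hyv⟩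
          · rintro (rfl | ⟨hy, _⟩)
            · exact Or.inl rfl
            · exact Or.inr hy
      rw [hperm.map _ |>.sum_eq]
      simp only [List.map_cons, List.sum_cons, List.count_cons_self]
      have hcongr : (PySem.Set.ofList (t.filter (· ≠ v))).map
            (fun k => cvsF (((v :: t).count k : Int))) =
          (PySem.Set.ofList (t.filter (· ≠ v))).map
            (fun k => cvsF (((t.filter (· ≠ v)).count k : Int))) := by
        apply List.map_congr_left
        intro k hk
        have hkv : k ≠ v := by
          have hmem := (PySem.Set.mem_ofList _ _).mp hk
          have := (List.mem_filter.mp hmem).2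
          simpa using this
        rw [List.count_cons_of_ne (Ne.symm hkv),
          ← List.count_filter (p := fun x => decide (x ≠ v)) (by simpa using hkv)]
      rw [hcongr]
      congr 1
      congr 1
      push_cast
      ring

-- the scan over a sorted list computes cvsN
theorem cvs_scan_spec (t : List Int) (prev run zero : Int)
    (hs : (prev :: t).Pairwise (· ≤ ·)) :
    cvsScan prev run zero t =
      zero + cvsF (run + (t.count prev : Int)) + cvsN (t.filter (· ≠ prev)) := by
  induction t generalizing prev run zero with
  | nil => simp [cvsScan, cvsF, cvsN_nil]
  | cons p t ih =>
    rcases List.pairwise_cons.mp hs with ⟨hprev, hpt⟩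
    by_cases hp : p = prev
    · subst hp
      rw [cvsScan, if_pos rfl, ih _ _ _ hpt]
      simp only [List.count_cons_self, List.filter_cons]
      simp only [show ¬ (p ≠ p) from fun h => h rfl, decide_false, decide_not]
      have harg : (run + 1 + (t.count p : Int)) = run + ((t.count p : Int) + 1) := by ring
      simp [harg]
    · have hne : ∀ q ∈ t, q ≠ prev := by
        intro q hq
        rcases List.pairwise_cons.mp hpt with ⟨hpq, _⟩
        have h1 := hpq q hq
        have h2 : prev < p := lt_of_le_of_ne (hprev p (List.mem_cons_self ..)) (Ne.symm hp)
        omega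
      rw [cvsScan, if_neg hp, ih _ _ _ hpt]
      have hcount : (p :: t).count prev = 0 := by
        rw [List.count_eq_zero]
        intro hmem
        rcases List.mem_cons.mp hmem with h | h
        · exact hp h.symm
        · exact hne _ h rfl
      have hfilter : (p :: t).filter (· ≠ prev) = p :: t := by
        apply List.filter_eq_self.mpr
        intro q hq
        rcases List.mem_cons.mp hq with rfl | h
        · simpa using hp
        · simpa using hne _ h
      rw [hcount, hfilter, cvsN_cons]
      simp only [Nat.cast_zero, add_zero, cvsF]
      ring

-- the two zero-pair tallies agree: A's Counter sum equals B's sorted-run scan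
theorem cvs_zero_eq (m : Int) (a : List Int) :
    ((a.foldl (cvsStepA m) (0, (PySem.Dict.empty).insert 0 1)).2.values.foldl
        (fun acc c => acc + PySem.Int.floordiv (c * (c - 1)) 2) 0) =
      (match PySem.List.sorted ((a.foldl (cvsBuild m) (0, [0])).2) (fun p => p) false with
        | [] => (0 : Int)
        | h :: t => cvsScan h 1 0 t) := by
  have hP : (a.foldl (cvsBuild m) (0, [0])).2 = 0 :: cvsPrefs m 0 a := cvs_loopB m a 0 [0]
  set P : List Int := 0 :: cvsPrefs m 0 a with hPdef
  -- A's counter is Counter(P)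
  have hctr : (a.foldl (cvsStepA m) (0, (PySem.Dict.empty).insert 0 1)).2 =
      PySem.Dict.counter P := by
    rw [cvs_loopA]
    rw [PySem.Dict.counter_eq_foldl, hPdef, List.foldl_cons]
    rfl
  rw [hctr, hP]
  -- A's side: sum of cvsF over the support of P
  rw [PySem.List.foldl_add]
  have hvals : (PySem.Dict.counter P).values =
      (PySem.Set.ofList P).map (fun k => ((P.count k : Int))) := by
    show (PySem.Dict.counter P).items.map (·.2) = _
    rw [PySem.Dict.items_counter]
    simp
  rw [hvals, List.map_map, zero_add]
  have hA : ((PySem.Set.ofList P).map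
        ((fun c => PySem.Int.floordiv (c * (c - 1)) 2) ∘ fun k => ((P.count k : Int)))).sum =
      ((PySem.Set.ofList P).map (fun k => cvsF (P.count k : Int))).sum := rfl
  rw [hA]
  -- B's side
  rcases hs : PySem.List.sorted P (fun p => p) false with _ | ⟨h, t⟩
  · have : P = [] := (PySem.List.sorted_eq_nil_iff P (fun p => p) false).mp hs
    simp [hPdef] at this
  have hm : (match h :: t with
      | [] => (0 : Int)
      | h' :: t' => cvsScan h' 1 0 t') = cvsScan h 1 0 t := rfl
  rw [hm]
  have hpair : (h :: t).Pairwise (· ≤ ·) := by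
    have hpw := PySem.List.sorted_pairwise P (fun p => p)
    rw [hs] at hpw
    simpa using hpw
  have hperm : (h :: t).Perm P := hs ▸ PySem.List.sorted_perm P (fun p => p) false
  rw [cvs_scan_spec t h 1 0 hpair]
  have hN : (0 : Int) + cvsF (1 + (t.count h : Int)) + cvsN (t.filter (· ≠ h)) =
      cvsN (h :: t) := by rw [cvsN_cons]; ring
  rw [hN, cvsN_char]
  have hcongr : (PySem.Set.ofList (h :: t)).map (fun k => cvsF ((h :: t).count k : Int)) =
      (PySem.Set.ofList (h :: t)).map (fun k => cvsF (P.count k : Int)) := by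
    apply List.map_congr_left
    intro k _
    rw [hperm.count_eq]
  rw [hcongr]
  exact cvs_sum_eq_of_nodup_mem _ _ _ (PySem.Set.nodup_ofList _) (PySem.Set.nodup_ofList _)
    (by
      intro y
      rw [PySem.Set.mem_ofList, PySem.Set.mem_ofList, hperm.mem_iff])

-- ===== VERDICT (by name: the statement is the Claim_ definition above) =====
theorem count_valid_subsegments_py_spec : Claim_equal_count_valid_subsegments_py := by
  intro n x a _ _
  unfold Spec_count_valid_subsegments_py
  simp only [count_valid_subsegments_py, count_valid_subsegments_py_alt]
  rw [cvs_zero_eq (x + 1) a]
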